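-- pv_equiv track=rewrite | github.com/Valtora/Nojoin | backend/processing/llm_services.py | parse_mapping_table
-- ===== SOURCE A (Python) =====
-- from typing import Dict, Tuple, List, Generator, Any, Optional
--
-- def parse_mapping_table(response_text: str) -> Dict[str, str]:
--     lines = [line.strip() for line in response_text.splitlines() if line.strip()]
--     mapping = {}
--     in_table = False
--     for line in lines:
--         if line.startswith("|") and "|" in line[1:]:
--             in_table = True
--             parts = [p.strip() for p in line.strip("|").split("|")]
--             if len(parts) == 2 and parts[0] != "Diarization Label" and not parts[0].startswith("-"):
--                 mapping[parts[0]] = parts[1]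
--         elif in_table and (not line.startswith("|")):
--             break
--     return mapping
-- ===== SOURCE B (Python) =====
-- def parse_mapping_table(response_text: str) -> dict:
--     lines = [s for s in (ln.strip() for ln in response_text.splitlines()) if s]
--     # locate the first real table row (a '|'-prefixed line with a second pipe)
--     k = 0
--     while k < len(lines) and not (lines[k].startswith("|") and "|" in lines[k][1:]):
--         k += 1
--     tail = lines[k:]
--     # the table block: the maximal run of '|'-prefixed lines from there
--     m = 0
--     while m < len(tail) and tail[m].startswith("|"):
--         m += 1
--     rows = [[p.strip() for p in ln.strip("|").split("|")] for ln in tail[:m]]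
--     return {r[0]: r[1] for r in rows
--             if len(r) == 2 and r[0] != "Diarization Label" and not r[0].startswith("-")}
-- ===== Notes on version B (the rewrite author's own statement) =====
-- stated objective: simpler
-- what changed: B replaces A's stateful scan (in_table flag plus break inside one loop) by a phase decomposition: locate the first real table row, take the maximal run of '|'-prefixed lines from there, then build the mapping by a single comprehension over that block.
import Mathlib
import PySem

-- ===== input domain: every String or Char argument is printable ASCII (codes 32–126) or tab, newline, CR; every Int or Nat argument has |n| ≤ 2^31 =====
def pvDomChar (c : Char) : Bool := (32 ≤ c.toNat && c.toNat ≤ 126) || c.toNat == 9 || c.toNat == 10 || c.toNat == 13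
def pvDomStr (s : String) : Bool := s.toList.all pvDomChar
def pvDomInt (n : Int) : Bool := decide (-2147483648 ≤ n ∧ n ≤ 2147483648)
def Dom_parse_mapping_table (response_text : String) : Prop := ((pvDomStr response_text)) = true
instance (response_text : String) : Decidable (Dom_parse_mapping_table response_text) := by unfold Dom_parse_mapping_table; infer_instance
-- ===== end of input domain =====

-- B replaces A's stateful single loop (in_table flag + break) by a phase decomposition: find the
-- first real table row, take the maximal run of '|'-prefixed lines, then one comprehension; same cost.

-- ===== PORT A =====
-- shared between the ports: both Python sources contain the identical preprocessing line,
-- the identical table-row test, the identical parts expression and the identical row guard+insert.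
def pvLines (t : String) : List String :=
  ((PySem.Str.splitlines t).map PySem.Str.strip).filter (fun s => s != "")

-- line.startswith("|") and "|" in line[1:]
def pvFull (l : String) : Bool :=
  PySem.Str.startswith l "|" && PySem.Str.isIn "|" (PySem.Str.slice l (some 1) none)

-- [p.strip() for p in line.strip("|").split("|")]   (split? is some: the separator "|" is non-empty)
def pvParts (l : String) : List String :=
  match PySem.Str.split? (PySem.Str.stripChars l "|") "|" with
  | some ps => ps.map PySem.Str.strip
  | none => []

-- if len(parts)==2 and parts[0] != "Diarization Label" and not parts[0].startswith("-"): mapping[parts[0]] = parts[1]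
def pvAddRow (d : PySem.Dict String String) (r : List String) : PySem.Dict String String :=
  match r with
  | [a, b] =>
    if a ≠ "Diarization Label" ∧ PySem.Str.startswith a "-" = false then d.insert a b else d
  | _ => d

-- A's loop over lines with the in_table flag; returning the accumulated dict models 'break'
def pvGoA : List String → PySem.Dict String String → Bool → PySem.Dict String String
  | [], m, _ => m
  | l :: ls, m, intable =>
    if pvFull l then pvGoA ls (pvAddRow m (pvParts l)) true
    else if intable && !(PySem.Str.startswith l "|") then m
    else pvGoA ls m intable

def parse_mapping_table (response_text : String) : List (String × String) :=
  (pvGoA (pvLines response_text) PySem.Dict.empty false).items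

-- ===== PORT B =====
-- while k < len(lines) and not (lines[k].startswith("|") and "|" in lines[k][1:]): k += 1
def pvFindStart (lines : List String) (k : Nat) : Nat :=
  if h : k < lines.length then
    if pvFull lines[k] then k else pvFindStart lines (k + 1)
  else k
termination_by lines.length - k
decreasing_by omega

-- while m < len(tail) and tail[m].startswith("|"): m += 1
def pvRun (tail : List String) (m : Nat) : Nat :=
  if h : m < tail.length then
    if PySem.Str.startswith tail[m] "|" then pvRun tail (m + 1) else m
  else m
termination_by tail.length - m
decreasing_by omega

def parse_mapping_table_alt (response_text : String) : List (String × String) :=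
  let lines := pvLines response_text
  let k := pvFindStart lines 0
  let tail := PySem.List.slice lines (some (k : Int)) none
  let m := pvRun tail 0
  let rows := (PySem.List.slice tail none (some (m : Int))).map pvParts
  (rows.foldl pvAddRow PySem.Dict.empty).items

-- ===== PRECONDITION & SPEC =====
def Spec_parse_mapping_table (response_text : String) (out : List (String × String)) : Prop := out = parse_mapping_table_alt response_text
instance (response_text : String) (out : List (String × String)) : Decidable (Spec_parse_mapping_table response_text out) := by unfold Spec_parse_mapping_table; infer_instance

-- ===== CLAIM (what is proved, stated in full; the proofs are below) =====
def Claim_equal_parse_mapping_table : Prop := ∀ (response_text : String), Dom_parse_mapping_table response_text → Spec_parse_mapping_table response_text (parse_mapping_table response_text)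

-- ===== LEMMAS AND PROOFS =====

lemma pv_pipe_toList : "|".toList = ['|'] := by decide

lemma pv_dropWhile_head {α : Type} (p : α → Bool) (xs : List α) (y : α) (ys : List α)
    (h : xs.dropWhile p = y :: ys) : p y = false := by
  induction xs with
  | nil => simp at h
  | cons a as ih =>
    rw [List.dropWhile_cons] at h
    by_cases hp : p a = true
    · simp [hp] at h; exact ih h
    · simp [hp] at h; simp [← h.1, Bool.eq_false_iff.mpr hp]

-- splitOn with a separator that does not occur returns the whole string
lemma pv_splitOn_go_no_sep (fuel : Nat) (l cur : List Char) (acc : List (List Char))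
    (h : '|' ∉ l) :
    PySem.Chars.splitOn.go ['|'] fuel l cur acc = ((cur.reverse ++ l) :: acc).reverse := by
  induction fuel generalizing l cur acc with
  | zero => simp [PySem.Chars.splitOn.go]
  | succ n ih =>
    cases l with
    | nil => simp [PySem.Chars.splitOn.go]
    | cons c rest =>
      have hc : ('|' == c) = false := by
        simp only [List.mem_cons, not_or] at h
        simpa using h.1
      have hr : '|' ∉ rest := by
        simp only [List.mem_cons, not_or] at h; exact h.2
      rw [PySem.Chars.splitOn.go]
      simp only [List.isPrefixOf, hc, Bool.false_and]
      rw [ih rest (c :: cur) acc hr]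
      simp

lemma pv_splitOn_no_sep (l : List Char) (h : '|' ∉ l) :
    PySem.Chars.splitOn l ['|'] = [l] := by
  unfold PySem.Chars.splitOn
  rw [pv_splitOn_go_no_sep _ _ _ _ h]
  simp

-- a '|'-prefixed line with no second pipe yields a single part, so the row guard never fires
lemma pv_parts_singleton (l : String) (h1 : PySem.Str.startswith l "|" = true)
    (h2 : pvFull l = false) : ∃ s, pvParts l = [s] := by
  have hpre : ("|".toList) <+: l.toList := by
    simpa [PySem.Str.startswith, PySem.Chars.startswith, List.isPrefixOf_iff_prefix] using h1
  obtain ⟨cs, hcs⟩ := hpre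
  have hl : l.toList = '|' :: cs := by simpa using hcs.symm
  have hIsIn : PySem.Str.isIn "|" (PySem.Str.slice l (some 1) none) = false := by
    simp only [pvFull, h1, Bool.true_and] at h2; exact h2
  have hnotin : '|' ∉ cs := by
    intro hmem
    obtain ⟨s, t, rfl⟩ := List.append_of_mem hmem
    have : PySem.Chars.isIn "|".toList (PySem.Str.slice l (some 1) none).toList = false := by
      simpa [PySem.Str.isIn] using hIsIn
    rw [PySem.Str.toList_slice] at this
    simp only [PySem.Chars.slice_eq_listSlice, PySem.List.slice_from_one, hl, List.tail_cons] at this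
    rw [PySem.Chars.isIn_eq_false_iff] at this
    exact this ⟨s, t, by simp⟩
  -- the stripped line contains no pipe
  have hX : (PySem.Str.stripChars l "|").toList = PySem.Chars.stripChars l.toList ['|'] := by
    rw [PySem.Str.toList_stripChars, pv_pipe_toList]
  have hstrip : ∀ c ∈ PySem.Chars.stripChars l.toList ['|'], c ∈ cs := by
    intro c hc
    unfold PySem.Chars.stripChars at hc
    rw [List.mem_reverse] at hc
    have hc2 := (List.dropWhile_sublist _).mem hc
    rw [List.mem_reverse] at hc2
    have hd : List.dropWhile (fun c => (['|'] : List Char).contains c) l.toList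
        = List.dropWhile (fun c => (['|'] : List Char).contains c) cs := by
      rw [hl, List.dropWhile_cons]; simp
    rw [hd] at hc2
    exact (List.dropWhile_sublist _).mem hc2
  have hnot2 : '|' ∉ PySem.Chars.stripChars l.toList ['|'] := fun hm => hnotin (hstrip _ hm)
  refine ⟨PySem.Str.strip (String.ofList (PySem.Chars.stripChars l.toList ['|'])), ?_⟩
  unfold pvParts
  rw [PySem.Str.split?, hX, pv_pipe_toList,
    PySem.Chars.split?, if_neg (by simp), pv_splitOn_no_sep _ hnot2]
  rfl

lemma pv_addRow_skip (m : PySem.Dict String String) (l : String)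
    (h1 : PySem.Str.startswith l "|" = true) (h2 : pvFull l = false) :
    pvAddRow m (pvParts l) = m := by
  obtain ⟨s, hs⟩ := pv_parts_singleton l h1 h2
  rw [hs]
  rfl

lemma pv_full_pipe {l : String} (h : pvFull l = true) : PySem.Str.startswith l "|" = true := by
  simp only [pvFull, Bool.and_eq_true] at h; exact h.1

-- A's loop before the table skips exactly the non-table-row prefix
lemma pv_goA_skip (lines : List String) (m : PySem.Dict String String) :
    pvGoA lines m false = pvGoA (lines.dropWhile (fun l => !pvFull l)) m false := by
  induction lines generalizing m with
  | nil => simp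
  | cons l ls ih =>
    by_cases hf : pvFull l = true
    · simp [hf]
    · simp only [pvGoA, Bool.false_and, List.dropWhile_cons, Bool.not_eq_eq_eq_not,
        Bool.not_true, hf]
      simp [ih]

-- A's loop inside the table folds the row update over the maximal '|'-prefixed run
lemma pv_goA_table (ls : List String) (m : PySem.Dict String String) :
    pvGoA ls m true
      = ((ls.takeWhile (fun l => PySem.Str.startswith l "|")).map pvParts).foldl pvAddRow m := by
  induction ls generalizing m with
  | nil => simp [pvGoA]
  | cons l ls ih =>
    by_cases hf : pvFull l = true
    · have hp' : PySem.Chars.startswith l.toList ['|'] = true := by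
        simpa using pv_full_pipe hf
      simp [pvGoA, hf, hp', ih]
    · by_cases hp : PySem.Str.startswith l "|" = true
      · have hp' : PySem.Chars.startswith l.toList ['|'] = true := by simpa using hp
        have hf' : pvFull l = false := Bool.eq_false_iff.mpr hf
        simp [pvGoA, hf', hp', ih, pv_addRow_skip m l hp hf']
      · have hp' : PySem.Chars.startswith l.toList ['|'] = false := by simpa using hp
        simp [pvGoA, Bool.eq_false_iff.mpr hf, hp']

-- A's whole loop, characterised
lemma pv_goA_eq (lines : List String) :
    pvGoA lines PySem.Dict.empty false
      = (((lines.dropWhile (fun l => !pvFull l)).takeWhile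
            (fun l => PySem.Str.startswith l "|")).map pvParts).foldl pvAddRow PySem.Dict.empty := by
  rw [pv_goA_skip]
  cases hd : lines.dropWhile (fun l => !pvFull l) with
  | nil => simp [pvGoA]
  | cons l ls =>
    have hf : pvFull l = true := by
      have := pv_dropWhile_head _ _ _ _ hd
      simpa using this
    have hp' : PySem.Chars.startswith l.toList ['|'] = true := by
      simpa using pv_full_pipe hf
    simp [pvGoA, hf, hp', pv_goA_table]

-- B's first while loop computes the dropWhile point
lemma pv_findStart_drop (lines : List String) (k : Nat) :
    lines.drop (pvFindStart lines k) = (lines.drop k).dropWhile (fun l => !pvFull l) := by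
  fun_induction pvFindStart lines k with
  | case1 k h hfull =>
    rw [List.drop_eq_getElem_cons h, List.dropWhile_cons]
    simp [hfull]
  | case2 k h hfull ih =>
    rw [ih, List.drop_eq_getElem_cons h, List.dropWhile_cons]
    simp [Bool.eq_false_iff.mpr hfull]
  | case3 k h =>
    rw [List.drop_eq_nil_of_le (by omega)]
    simp

-- B's second while loop computes the takeWhile point
lemma pv_run_take (tail : List String) (m : Nat) :
    tail.take (pvRun tail m)
      = tail.take m ++ (tail.drop m).takeWhile (fun l => PySem.Str.startswith l "|") := by
  fun_induction pvRun tail m with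
  | case1 m h hp ih =>
    have hp' : PySem.Chars.startswith tail[m].toList ['|'] = true := by simpa using hp
    have ht : List.take (m + 1) tail = List.take m tail ++ [tail[m]] := by
      rw [List.take_add_one]
      simp [List.getElem?_eq_getElem h]
    rw [ih, List.drop_eq_getElem_cons h, List.takeWhile_cons, ht, List.append_assoc]
    rw [if_pos hp]
    rfl
  | case2 m h hp =>
    have hp' : PySem.Chars.startswith tail[m].toList ['|'] = false := by simpa using hp
    rw [List.drop_eq_getElem_cons h, List.takeWhile_cons]
    simp [hp']
  | case3 m h =>
    rw [List.drop_eq_nil_of_le (by omega)]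
    simp

-- ===== VERDICT (by name: the statement is the Claim_ definition above) =====
theorem parse_mapping_table_spec : Claim_equal_parse_mapping_table := by
  intro t _
  unfold Spec_parse_mapping_table
  unfold parse_mapping_table
  rw [pv_goA_eq]
  simp only [parse_mapping_table_alt, PySem.List.slice_from_natCast,
    PySem.List.slice_to_natCast, pv_findStart_drop, List.drop_zero, pv_run_take,
    List.take_zero, List.nil_append]
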